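-- pv_equiv track=rewrite | github.com/trendmicro/tm-v1-api-cookbook | documentation-security-posture/python/documentation_security_posture.py | make_title
-- ===== SOURCE A (Python) =====
-- import itertools
--
-- def is_container(v):
--     try:
--         if isinstance(v, (str, bytes)):
--             return False
--         iter(v)
--     except TypeError:
--         return False
--     return True
--
-- def split_camel_case(s):
--     if not s:
--         return []
--     indexes = [0]
--     length = len(s)
--     indexes.extend(i for i in range(1, length-1) if (
--         s[i].isupper() and (s[i-1].islower() or s[i+1].islower())
--     ))
--     indexes.append(length)
--     return [s[indexes[i]:indexes[i+1]] for i in range(len(indexes) - 1)]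
--
-- def unique_list(v):
--     return list(dict.fromkeys(v))
--
-- abbreviations = ['xdr', 'cve', 'os', 'edr']
--
-- def make_title(s):
--     strings = s if is_container(s) else [s]
--     words = list(itertools.chain.from_iterable(
--         split_camel_case(word) for s in strings for word in s.split()
--     ))
--     words = [w.capitalize() if w and w[0].islower() else w for w in words]
--     words = [w.upper() if w.lower() in abbreviations else w for w in words]
--     return ' '.join(unique_list(words))
-- ===== SOURCE B (Python) =====
-- import itertools
--
-- abbreviations = ['xdr', 'cve', 'os', 'edr']
--
-- def is_container(v):
--     try:
--         if isinstance(v, (str, bytes)):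
--             return False
--         iter(v)
--     except TypeError:
--         return False
--     return True
--
-- def make_title(s):
--     strings = s if is_container(s) else [s]
--     out = []
--     seen = set()
--
--     def emit(frag):
--         if frag and frag[0].islower():
--             frag = frag.capitalize()
--         if frag.lower() in abbreviations:
--             frag = frag.upper()
--         if frag not in seen:
--             seen.add(frag)
--             out.append(frag)
--
--     for text in strings:
--         for w in text.split():
--             frag = prev = w[0]
--             # stream the rest of the word with one-character lookahead:
--             # cut right before an upper-case char with a lower-case neighbour
--             for c, nxt in itertools.zip_longest(w[1:], w[2:]):
--                 if nxt is not None and c.isupper() and (prev.islower() or nxt.islower()):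
--                     emit(frag)
--                     frag = ''
--                 frag += c
--                 prev = c
--             emit(frag)
--     return ' '.join(out)
-- ===== Notes on version B (the rewrite author's own statement) =====
-- stated objective: alternative
-- what changed: Replaced A's staged pipeline (build an index list per word, slice it into fragments, then two whole-list map passes and dict.fromkeys dedup) with a character-level streaming scanner: each word is consumed once with a one-character lookahead (itertools.zip_longest), cutting fragments on the fly and pushing each fragment through a transform-and-dedup emitter, so no index lists, slices or intermediate word lists are built.
import Mathlib
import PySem

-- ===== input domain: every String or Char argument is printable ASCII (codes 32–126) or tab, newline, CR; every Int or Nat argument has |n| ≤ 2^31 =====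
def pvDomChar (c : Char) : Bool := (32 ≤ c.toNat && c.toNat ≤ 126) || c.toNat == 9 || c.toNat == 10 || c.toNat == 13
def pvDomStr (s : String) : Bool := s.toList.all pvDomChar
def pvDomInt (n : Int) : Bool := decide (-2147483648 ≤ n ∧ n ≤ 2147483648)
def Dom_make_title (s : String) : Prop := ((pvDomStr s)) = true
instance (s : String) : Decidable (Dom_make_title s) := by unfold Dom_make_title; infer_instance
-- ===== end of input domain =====

-- B replaces A's index-list/slice/map/map/dedup pipeline by a character-level streaming
-- scanner with one-char lookahead feeding a transform-and-dedup emitter; same return value.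

-- ===== PORT A =====
-- abbreviations = ['xdr', 'cve', 'os', 'edr']
def abbreviations : List (List Char) :=
  [['x','d','r'], ['c','v','e'], ['o','s'], ['e','d','r']]

-- split_camel_case (A's helper: index list, then slices)
def split_camel_case (s : List Char) : List (List Char) :=
  if s = [] then []
  else
    let length : Int := s.length
    let indexes : List Int :=
      [0] ++ ((PySem.List.pyRange 1 (length - 1) 1).filter (fun i =>
        PySem.Chars.isupper (PySem.List.pyGetD s i ' ') &&
        (PySem.Chars.islower (PySem.List.pyGetD s (i - 1) ' ') ||
         PySem.Chars.islower (PySem.List.pyGetD s (i + 1) ' ')))) ++ [length]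
    (PySem.List.pyRange 0 ((indexes.length : Int) - 1) 1).map (fun i =>
      PySem.List.slice s (some (PySem.List.pyGetD indexes i 0))
                         (some (PySem.List.pyGetD indexes (i + 1) 0)))

-- w.capitalize(): first char title-cased, rest lowered; exact on the ASCII domain
def pyCapitalize (w : List Char) : List Char :=
  match w with
  | [] => []
  | c :: rest => PySem.Chars.upperChar c :: PySem.Chars.lower rest

-- is_container(s) is False for a str argument, so 'strings = [s]' in both ports.
def make_title (s : String) : String :=
  let strings : List (List Char) := [s.toList]
  let words : List (List Char) :=
    (strings.flatMap (fun t => PySem.Chars.split₀ t)).flatMap split_camel_case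
  let words2 : List (List Char) :=
    words.map (fun w => if w ≠ [] ∧ PySem.Chars.islower (w.headD ' ') then pyCapitalize w else w)
  let words3 : List (List Char) :=
    words2.map (fun w => if abbreviations.contains (PySem.Chars.lower w) then PySem.Chars.upper w else w)
  String.ofList (PySem.Chars.join [' '] (PySem.List.dedup words3))

-- ===== PORT B =====
-- Source B's emit(frag): capitalize if lower-case first char, uppercase abbreviations, append if unseen
def pvEmit (acc : List (List Char) × PySem.Set (List Char)) (frag : List Char) :
    List (List Char) × PySem.Set (List Char) :=
  let f1 := if frag ≠ [] ∧ PySem.Chars.islower (frag.headD ' ') then pyCapitalize frag else frag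
  let f2 := if abbreviations.contains (PySem.Chars.lower f1) then PySem.Chars.upper f1 else f1
  if PySem.Set.contains acc.2 f2 then acc else (acc.1 ++ [f2], PySem.Set.add acc.2 f2)

-- Source B's inner loop: 'for c, nxt in zip_longest(w[1:], w[2:])' as recursion on the tail,
-- nxt = head? of the remaining characters (none at the last char)
def scanWord (acc : List (List Char) × PySem.Set (List Char)) (prev : Char)
    (frag : List Char) (rest : List Char) : List (List Char) × PySem.Set (List Char) :=
  match rest with
  | [] => pvEmit acc frag
  | c :: rest' =>
      match rest'.head? with
      | some nxt =>
          if PySem.Chars.isupper c && (PySem.Chars.islower prev || PySem.Chars.islower nxt) then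
            scanWord (pvEmit acc frag) c [c] rest'
          else
            scanWord acc c (frag ++ [c]) rest'
      | none => scanWord acc c (frag ++ [c]) rest'

def make_title_alt (s : String) : String :=
  let res :=
    (PySem.Chars.split₀ s.toList).foldl
      (fun acc w =>
        match w with
        | [] => acc            -- unreachable: split() never yields an empty word
        | c :: rest => scanWord acc c [c] rest)
      ([], PySem.Set.empty)
  String.ofList (PySem.Chars.join [' '] res.1)

-- ===== PRECONDITION & SPEC =====
def Spec_make_title (s : String) (out : String) : Prop := out = make_title_alt s
instance (s : String) (out : String) : Decidable (Spec_make_title s out) := by unfold Spec_make_title; infer_instance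

-- ===== CLAIM (what is proved, stated in full; the proofs are below) =====
def Claim_equal_make_title : Prop := ∀ (s : String), Dom_make_title s → Spec_make_title s (make_title s)

-- ===== LEMMAS AND PROOFS =====

-- the per-fragment transform both programs apply
def tf (w : List Char) : List Char :=
  let w1 := if w ≠ [] ∧ PySem.Chars.islower (w.headD ' ') then pyCapitalize w else w
  if abbreviations.contains (PySem.Chars.lower w1) then PySem.Chars.upper w1 else w1

-- the fragment list B's scanner cuts, as a pure function
def fragsAux (prev : Char) (frag : List Char) (rest : List Char) : List (List Char) :=
  match rest with
  | [] => [frag]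
  | c :: rest' =>
      match rest'.head? with
      | some nxt =>
          if PySem.Chars.isupper c && (PySem.Chars.islower prev || PySem.Chars.islower nxt) then
            frag :: fragsAux c [c] rest'
          else
            fragsAux c (frag ++ [c]) rest'
      | none => fragsAux c (frag ++ [c]) rest'

-- fold fusion: the scanner is the fold of the emitter over its fragment list
theorem scanWord_eq_foldl : ∀ (rest : List Char) (prev : Char) (frag : List Char) acc,
    scanWord acc prev frag rest = (fragsAux prev frag rest).foldl pvEmit acc := by
  intro rest
  induction rest with
  | nil => intro prev frag acc; rfl
  | cons c rest' ih =>
      intro prev frag acc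
      simp only [scanWord, fragsAux]
      cases h : rest'.head? with
      | none => simp [ih]
      | some nxt =>
          by_cases hc : (PySem.Chars.isupper c &&
              (PySem.Chars.islower prev || PySem.Chars.islower nxt)) = true
          · simp [hc, ih, List.foldl_cons]
          · simp [hc, ih]

-- consecutive-pair slicing of A's index list, as a recursion
def chunks (s : List Char) (x : Int) : List Int → List (List Char)
  | [] => []
  | y :: ys => PySem.List.slice s (some x) (some y) :: chunks s y ys

theorem map_slices_eq_chunks (s : List Char) :
    ∀ (xs : List Int) (x : Int),
      (PySem.List.pyRange 0 (((x :: xs).length : Int) - 1) 1).map (fun i =>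
        PySem.List.slice s (some (PySem.List.pyGetD (x :: xs) i 0))
                           (some (PySem.List.pyGetD (x :: xs) (i + 1) 0)))
      = chunks s x xs := by
  intro xs
  induction xs with
  | nil =>
      intro x
      simp [PySem.List.pyRange_one_eq_nil, chunks]
  | cons y ys ih =>
      intro x
      have ihy := ih y
      rw [show (((y :: ys).length : Int) - 1) = ((ys.length : Nat) : Int) by
            push_cast [List.length_cons]; ring] at ihy
      rw [PySem.List.pyRange_one, Int.sub_zero, Int.toNat_natCast] at ihy
      rw [show (((x :: y :: ys).length : Int) - 1) = ((ys.length + 1 : Nat) : Int) by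
            push_cast [List.length_cons]; ring,
          PySem.List.pyRange_one, Int.sub_zero, Int.toNat_natCast,
          List.range_succ_eq_map, List.map_cons, List.map_map]
      show _ :: _ = chunks s x (y :: ys)
      simp only [chunks]
      congr 1
      · norm_num [PySem.List.pyGetD_ofNat']
      · rw [← ihy]
        simp only [List.map_map]
        apply List.map_congr_left
        intro k hk
        simp only [Function.comp_apply, Nat.succ_eq_add_one]
        push_cast
        rw [show ((0 : Int) + ((k : Int) + 1) + 1) = ((k + 2 : Nat) : Int) by push_cast; ring,
            show ((0 : Int) + ((k : Int) + 1)) = ((k + 1 : Nat) : Int) by push_cast; ring,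
            show ((0 : Int) + (k : Int) + 1) = ((k + 1 : Nat) : Int) by push_cast; ring,
            show ((0 : Int) + (k : Int)) = ((k : Nat) : Int) by ring]
        rw [PySem.List.pyGetD_natCast, PySem.List.pyGetD_natCast,
            PySem.List.pyGetD_natCast, PySem.List.pyGetD_natCast]
        simp

-- the boundary predicate of A's filter
def bCond (w : List Char) (i : Int) : Bool :=
  PySem.Chars.isupper (PySem.List.pyGetD w i ' ') &&
  (PySem.Chars.islower (PySem.List.pyGetD w (i - 1) ' ') ||
   PySem.Chars.islower (PySem.List.pyGetD w (i + 1) ' '))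

-- the scanner's fragment list is exactly the chunks of A's filtered index list
theorem fragsAux_eq_chunks (w : List Char) :
    ∀ (m start i : Nat), start < i → i + m = w.length →
      fragsAux (w.getD (i - 1) ' ') ((w.drop start).take (i - start)) (w.drop i)
      = chunks w (start : Int)
          (((PySem.List.pyRange (i : Int) ((w.length : Int) - 1) 1).filter (bCond w)) ++ [(w.length : Int)]) := by
  intro m
  induction m with
  | zero =>
      intro start i hsi hlen
      have hi : i = w.length := by omega
      subst hi
      rw [List.drop_length]
      rw [PySem.List.pyRange_one_eq_nil (by omega)]
      simp only [List.filter_nil, List.nil_append, chunks]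
      rw [PySem.List.slice_natCast]
      simp [fragsAux]
  | succ m ihm =>
      intro start i hsi hlen
      have hiw : i < w.length := by omega
      have hd : w.drop i = w.getD i ' ' :: w.drop (i + 1) := by
        rw [List.drop_eq_getElem_cons hiw, List.getD_eq_getElem w ' ' hiw]
      rw [hd]
      have hh : (w.drop (i + 1)).head? = w[i+1]? := List.head?_drop
      have hfrag : (w.drop start).take (i - start) ++ [w.getD i ' '] = (w.drop start).take (i + 1 - start) := by
        rw [show i + 1 - start = (i - start) + 1 by omega, List.take_add_one]
        congr 1
        rw [List.getElem?_drop, show start + (i - start) = i by omega,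
            List.getElem?_eq_getElem hiw, List.getD_eq_getElem w ' ' hiw]
        rfl
      by_cases h2 : i + 1 < w.length
      · have hh2 : (w.drop (i + 1)).head? = some (w.getD (i+1) ' ') := by
          rw [hh, List.getElem?_eq_getElem h2, List.getD_eq_getElem w ' ' h2]
        have hcond : (PySem.Chars.isupper (w.getD i ' ') &&
            (PySem.Chars.islower (w.getD (i-1) ' ') || PySem.Chars.islower (w.getD (i+1) ' ')))
            = bCond w (i : Int) := by
          unfold bCond
          rw [show ((i : Int) - 1) = ((i - 1 : Nat) : Int) by omega,
              show ((i : Int) + 1) = ((i + 1 : Nat) : Int) by omega,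
              PySem.List.pyGetD_natCast, PySem.List.pyGetD_natCast, PySem.List.pyGetD_natCast]
        have hrange : PySem.List.pyRange (i : Int) ((w.length : Int) - 1) 1
            = (i : Int) :: PySem.List.pyRange ((i : Int) + 1) ((w.length : Int) - 1) 1 :=
          PySem.List.pyRange_one_cons (by omega)
        simp only [fragsAux, hh2]
        rw [hcond]
        by_cases hb : bCond w (i : Int) = true
        · rw [if_pos hb, hrange, List.filter_cons_of_pos hb]
          simp only [List.cons_append, chunks]
          have ht := ihm i (i+1) (by omega) (by omega)
          simp only [Nat.add_sub_cancel] at ht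
          have htk : (w.drop i).take (i + 1 - i) = [w.getD i ' '] := by
            rw [show i + 1 - i = 1 by omega, hd]; rfl
          rw [htk] at ht
          rw [PySem.List.slice_natCast]
          rw [show ((i : Int) + 1) = ((i + 1 : Nat) : Int) by omega]
          rw [ht]
        · rw [if_neg hb, hrange, List.filter_cons_of_neg (by simpa using hb)]
          have ht := ihm start (i+1) (by omega) (by omega)
          simp only [Nat.add_sub_cancel] at ht
          rw [← hfrag] at ht
          rw [show ((i : Int) + 1) = ((i + 1 : Nat) : Int) by omega]
          exact ht
      · have hh2 : (w.drop (i + 1)).head? = none := by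
          rw [hh, List.getElem?_eq_none]; omega
        simp only [fragsAux, hh2]
        have ht := ihm start (i+1) (by omega) (by omega)
        simp only [Nat.add_sub_cancel] at ht
        rw [← hfrag] at ht
        rw [PySem.List.pyRange_one_eq_nil (by omega)] at ht
        rw [PySem.List.pyRange_one_eq_nil (by omega)]
        exact ht

-- per word: B's scan equals folding the emitter over A's split_camel_case
theorem perWord_eq (w : List Char) (acc : List (List Char) × PySem.Set (List Char)) :
    (match w with
     | [] => acc
     | c :: rest => scanWord acc c [c] rest)
    = (split_camel_case w).foldl pvEmit acc := by
  cases w with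
  | nil => simp [split_camel_case]
  | cons c rest =>
      show scanWord acc c [c] rest = _
      rw [scanWord_eq_foldl]
      congr 1
      have H := fragsAux_eq_chunks (c :: rest) rest.length 0 1 (by omega) (by simp [Nat.add_comm])
      simp only [show (1:Nat)-1 = 0 from rfl, show (1:Nat)-0 = 1 from rfl, List.getD_cons_zero,
        List.drop_zero, List.drop_succ_cons, List.take_succ_cons, List.take_zero,
        Nat.cast_one, Nat.cast_zero] at H
      rw [split_camel_case, if_neg (by simp)]
      simp only
      exact H.trans (map_slices_eq_chunks (c :: rest) _ 0).symm

-- nested word/fragment folds are one fold over the flattened fragment list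
theorem foldl_foldl_flatMap {α β γ : Type} (f : α → List β) (step : γ → β → γ) :
    ∀ (l : List α) (init : γ),
      l.foldl (fun acc x => (f x).foldl step acc) init = (l.flatMap f).foldl step init := by
  intro l
  induction l with
  | nil => intro init; rfl
  | cons x xs ih =>
      intro init
      simp [List.flatMap_cons, List.foldl_append, ih]

-- invariant: out list and seen set stay equal, so the fused emit is Set.add of tf
theorem fused_fold_eq_add_fold (xs : List (List Char)) :
    ∀ (out : List (List Char)),
      (xs.foldl pvEmit (out, out)).1
      = xs.foldl (fun s frag => PySem.Set.add s (tf frag)) out := by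
  induction xs with
  | nil => intro out; rfl
  | cons x xs ih =>
      intro out
      simp only [List.foldl_cons]
      have key : ∀ (acc : List (List Char) × PySem.Set (List Char)) f,
          pvEmit acc f = if PySem.Set.contains acc.2 (tf f) then acc
                         else (acc.1 ++ [tf f], PySem.Set.add acc.2 (tf f)) := fun _ _ => rfl
      by_cases h : tf x ∈ out
      · have hs : pvEmit (out, out) x = (out, out) := by
          rw [key]; simp [PySem.Set.contains_eq_listContains, h]
        rw [hs, PySem.Set.add_of_mem h, ih]
      · have hs : pvEmit (out, out) x = (out ++ [tf x], out ++ [tf x]) := by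
          rw [key]; simp [PySem.Set.contains_eq_listContains, h]
        rw [hs, PySem.Set.add_of_not_mem h, ih]

theorem make_title_spec' (s : String) : make_title s = make_title_alt s := by
  unfold make_title make_title_alt
  dsimp only
  rw [show (fun (acc : List (List Char) × PySem.Set (List Char)) (w : List Char) =>
        (match w with
         | [] => acc
         | c :: rest => scanWord acc c [c] rest))
      = (fun acc w => (split_camel_case w).foldl pvEmit acc) from
        funext fun acc => funext fun w => perWord_eq w acc]
  rw [foldl_foldl_flatMap split_camel_case pvEmit]
  rw [show (([], PySem.Set.empty) : List (List Char) × PySem.Set (List Char))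
        = (([], []) : List (List Char) × PySem.Set (List Char)) from rfl]
  rw [fused_fold_eq_add_fold]
  rw [← PySem.Set.update_map_eq_foldl_add, PySem.Set.update_nil_left]
  simp only [List.flatMap_cons, List.flatMap_nil, List.append_nil, List.map_map,
    PySem.List.dedup_eq_ofList]
  rfl

-- ===== VERDICT (by name: the statement is the Claim_ definition above) =====
theorem make_title_spec : Claim_equal_make_title := by
  intro s _
  unfold Spec_make_title
  exact make_title_spec' s
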